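-- pv_equiv track=rewrite | github.com/kingdongus/AoC-2023 | day07/solution.py | is_n_of_a_kind
-- ===== SOURCE A (Python) =====
-- def is_n_of_a_kind(hand, n):
--     counts = {}
--
--     for card in hand:
--         counts[card] = counts.get(card, 0) + 1
--
--     for count in counts.values():
--         if count == n:
--             return True
--
--     return False
-- ===== SOURCE B (Python) =====
-- def is_n_of_a_kind(hand, n):
--     h = sorted(hand)
--     i = 0
--     while i < len(h):
--         j = i + 1
--         while j < len(h) and h[j] == h[i]:
--             j += 1
--         if j - i == n:
--             return True
--         i = j
--     return False
-- ===== Notes on version B (the rewrite author's own statement) =====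
-- stated objective: alternative
-- what changed: Replaces the frequency-dict build plus values scan with sort-then-scan: sort the hand and walk it measuring the length of each run of equal cards, returning True when a run has length n.
import Mathlib
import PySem

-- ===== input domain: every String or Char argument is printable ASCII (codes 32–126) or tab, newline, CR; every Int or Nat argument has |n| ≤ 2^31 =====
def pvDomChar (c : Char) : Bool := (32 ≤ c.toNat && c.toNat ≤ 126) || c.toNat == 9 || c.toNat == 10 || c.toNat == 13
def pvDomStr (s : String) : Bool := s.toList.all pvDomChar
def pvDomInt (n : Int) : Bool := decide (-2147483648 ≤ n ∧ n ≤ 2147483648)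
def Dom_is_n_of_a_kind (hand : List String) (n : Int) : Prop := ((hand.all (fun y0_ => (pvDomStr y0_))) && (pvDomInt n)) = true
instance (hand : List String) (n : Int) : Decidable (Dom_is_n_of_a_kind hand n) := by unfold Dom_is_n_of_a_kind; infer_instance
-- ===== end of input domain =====

-- B replaces A's frequency dict + values scan with a different algorithm: sort the hand, then scan it measuring each run of equal cards, returning true when a run has length n.


-- ===== PORT A =====
def is_n_of_a_kind (hand : List String) (n : Int) : Bool :=
  let counts := hand.foldl (fun d card => d.insert card (d.getD card 0 + 1)) PySem.Dict.empty
  counts.values.any (fun count => count == n)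

-- ===== PORT B =====
-- inner `while j < len(h) and h[j] == c: j += 1` (h[j] only read with j < len(h), so a plain getElem is exact)
def pvInnerRun (h : List String) (c : String) (run : Nat) : Nat :=
  if hl : run < h.length then
    if h[run] = c then pvInnerRun h c (run + 1) else run
  else run
termination_by h.length - run

-- the inner while never moves the index backwards (cited by the outer loop's termination proof)
theorem pvInnerRun_ge (h : List String) (c : String) (run : Nat) : run <= pvInnerRun h c run := by
  induction run using pvInnerRun.induct h c with
  | case1 r hl heq ih => rw [pvInnerRun]; simp only [hl, dif_pos, heq, if_pos]; omega
  | case2 r hl heq => rw [pvInnerRun]; simp [hl, heq]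
  | case3 r hl => rw [pvInnerRun]; simp [hl]

-- outer `while i < len(h):` loop of Source B (j - i on Python ints equals the Nat subtraction here since j >= i + 1)
def pvScan (h : List String) (n : Int) (i : Nat) : Bool :=
  if hi : i < h.length then
    let j := pvInnerRun h h[i] (i + 1)
    if ((j - i : Nat) : Int) == n then true else pvScan h n j
  else false
termination_by h.length - i
decreasing_by
  have h1 : i + 1 <= pvInnerRun h h[i] (i + 1) := pvInnerRun_ge _ _ _
  omega

def is_n_of_a_kind_alt (hand : List String) (n : Int) : Bool :=
  pvScan (PySem.List.sorted hand (fun x => x) false) n 0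

-- ===== PRECONDITION & SPEC =====
def Spec_is_n_of_a_kind (hand : List String) (n : Int) (out : Bool) : Prop := out = is_n_of_a_kind_alt hand n
instance (hand : List String) (n : Int) (out : Bool) : Decidable (Spec_is_n_of_a_kind hand n out) := by unfold Spec_is_n_of_a_kind; infer_instance

-- ===== CLAIM =====
def Claim_equal_is_n_of_a_kind : Prop := ∀ (hand : List String) (n : Int), Dom_is_n_of_a_kind hand n → Spec_is_n_of_a_kind hand n (is_n_of_a_kind hand n)

-- ===== LEMMAS AND PROOFS =====

-- proof-side model of the scan: the same run-length walk phrased on the suffix list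
def pvOuterLoop : List String → Int → Bool
  | [], _ => false
  | c :: tl, n =>
    let run := pvInnerRun (c :: tl) c 1
    if (run : Int) == n then true else pvOuterLoop ((c :: tl).drop run) n
termination_by h _ => h.length
decreasing_by
  have h1 : 1 <= pvInnerRun (c :: tl) c 1 := pvInnerRun_ge _ _ _
  simp only [List.length_drop, List.length_cons]
  omega

-- A's value: some distinct card occurs exactly n times.
theorem a_iff (hand : List String) (n : Int) :
    is_n_of_a_kind hand n = true ↔ ∃ c ∈ hand, (hand.count c : Int) = n := by
  unfold is_n_of_a_kind
  simp [PySem.Dict.foldl_insert_getD_add_one_eq_counter, PySem.Dict.values,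
        PySem.Dict.items_counter, List.any_map, Function.comp_def,
        PySem.Set.mem_ofList]

-- the inner while computes r plus the length of the run of c's starting at position r
theorem pvInnerRun_eq (h : List String) (c : String) (run : Nat) :
    pvInnerRun h c run = run + ((h.drop run).takeWhile (fun x => x == c)).length := by
  induction run using pvInnerRun.induct h c with
  | case1 r hl heq ih =>
    rw [pvInnerRun]; simp only [hl, dif_pos, heq, if_pos, ih]
    rw [List.drop_eq_getElem_cons hl]
    simp [heq]
    omega
  | case2 r hl heq =>
    rw [pvInnerRun]; simp only [hl, dif_pos, heq]
    rw [List.drop_eq_getElem_cons hl]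
    simp [heq]
  | case3 r hl =>
    rw [pvInnerRun]
    simp only [hl]
    rw [List.drop_eq_nil_of_le (by omega)]
    simp

-- the facts the run-scan step needs about a sorted c :: tl
theorem run_facts (c : String) (tl : List String) (hs : (c :: tl).Pairwise (· ≤ ·)) :
    ((c :: tl).count c = pvInnerRun (c :: tl) c 1) ∧
    ((c :: tl).drop (pvInnerRun (c :: tl) c 1) = tl.dropWhile (fun x => x == c)) ∧
    (∀ x ∈ tl.dropWhile (fun x => x == c), x ≠ c) ∧
    ((tl.dropWhile (fun x => x == c)).Pairwise (· ≤ ·)) ∧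
    (∀ x, x ≠ c → (c :: tl).count x = (tl.dropWhile (fun x => x == c)).count x) ∧
    (∀ x ∈ (c :: tl), x = c ∨ x ∈ tl.dropWhile (fun x => x == c)) := by
  have hrun : pvInnerRun (c :: tl) c 1 = 1 + (tl.takeWhile (fun x => x == c)).length := by
    rw [pvInnerRun_eq]; simp
  have htl : tl = tl.takeWhile (fun x => x == c) ++ tl.dropWhile (fun x => x == c) :=
    (List.takeWhile_append_dropWhile (p := fun x => x == c) (l := tl)).symm
  have hpall : ∀ x ∈ tl.takeWhile (fun x => x == c), x = c := by
    intro x hx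
    have := List.mem_takeWhile_imp hx
    simpa using this
  have hspw : (tl.dropWhile (fun x => x == c)).Pairwise (· ≤ ·) :=
    ((List.pairwise_cons.1 hs).2).sublist (List.dropWhile_sublist _)
  have hsall : ∀ x ∈ tl.dropWhile (fun x => x == c), x ≠ c := by
    intro x hx he
    have hcs : c ∈ tl.dropWhile (fun x => x == c) := he ▸ hx
    obtain ⟨d, s', hse⟩ : ∃ d s', tl.dropWhile (fun x => x == c) = d :: s' := by
      cases hq : tl.dropWhile (fun x => x == c) with
      | nil => rw [hq] at hcs; cases hcs
      | cons a b => exact ⟨a, b, rfl⟩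
    have hdne : d ≠ c := by
      have := List.head?_dropWhile_not (fun x => x == c) tl
      rw [hse] at this
      simpa using this
    have hdmem : d ∈ tl := (List.dropWhile_sublist (fun x => x == c)).subset (by rw [hse]; simp)
    have hlt : c < d := lt_of_le_of_ne ((List.pairwise_cons.1 hs).1 d hdmem) (Ne.symm hdne)
    rw [hse] at hcs
    rcases List.mem_cons.1 hcs with he2 | hmem
    · exact hdne he2.symm
    · have hdle : d ≤ c := by
        rw [hse] at hspw
        exact (List.pairwise_cons.1 hspw).1 c hmem
      exact absurd (lt_of_lt_of_le hlt hdle) (lt_irrefl _)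
  refine ⟨?_, ?_, hsall, hspw, ?_, ?_⟩
  · rw [hrun, List.count_cons_self]
    conv_lhs => rw [htl]
    rw [List.count_append]
    have h1 : (tl.takeWhile (fun x => x == c)).count c = (tl.takeWhile (fun x => x == c)).length := by
      rw [List.count_eq_length]
      intro a ha; exact (hpall a ha).symm
    have h2 : (tl.dropWhile (fun x => x == c)).count c = 0 := by
      rw [List.count_eq_zero]
      intro hc
      exact hsall c hc rfl
    omega
  · rw [hrun, Nat.add_comm 1, List.drop_succ_cons]
    nth_rewrite 2 [htl]
    exact List.drop_left
  · intro x hx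
    rw [List.count_cons_of_ne (Ne.symm hx)]
    conv_lhs => rw [htl]
    rw [List.count_append]
    have : (tl.takeWhile (fun x => x == c)).count x = 0 := by
      rw [List.count_eq_zero]
      intro hc
      exact hx (hpall x hc)
    omega
  · intro x hx
    rcases List.mem_cons.1 hx with he | hmem
    · exact Or.inl he
    · rw [htl] at hmem
      rcases List.mem_append.1 hmem with hpp | hss
      · exact Or.inl (hpall x hpp)
      · exact Or.inr hss

-- the run-scan over a sorted list finds exactly the cards of multiplicity n
theorem outer_iff (h : List String) (n : Int) :
    h.Pairwise (· ≤ ·) → (pvOuterLoop h n = true ↔ ∃ x ∈ h, (h.count x : Int) = n) := by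
  induction h, n using pvOuterLoop.induct with
  | case1 n => intro _; simp [pvOuterLoop]
  | case2 c tl n run hthen =>
    intro hs
    obtain ⟨hcc, _, _, _, _, _⟩ := run_facts c tl hs
    rw [pvOuterLoop.eq_2, if_pos hthen]
    simp only [true_iff]
    exact ⟨c, by simp, by rw [hcc]; exact beq_iff_eq.1 hthen⟩
  | case3 c tl n run helse ih =>
    intro hs
    obtain ⟨hcc, hdrop, hsall, hspw, hcount, hmem⟩ := run_facts c tl hs
    rw [pvOuterLoop.eq_2, if_neg helse]
    rw [show List.drop (pvInnerRun (c :: tl) c 1) (c :: tl) = tl.dropWhile (fun x => x == c) from hdrop] at ih ⊢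
    rw [ih hspw]
    constructor
    · rintro ⟨x, hxm, hxc⟩
      refine ⟨x, ?_, by rw [hcount x (hsall x hxm)]; exact hxc⟩
      exact List.mem_cons_of_mem c ((List.dropWhile_sublist (fun x => x == c)).subset hxm)
    · rintro ⟨x, hxm, hxc⟩
      have hxne : x ≠ c := by
        intro he; subst he
        rw [hcc] at hxc
        exact helse (by simpa using hxc)
      rcases hmem x hxm with he | hss
      · exact absurd he hxne
      · exact ⟨x, hss, by rw [← hcount x hxne]; exact hxc⟩

-- the index-based scan equals the suffix-based walk
theorem pvScan_eq_outer (h : List String) (n : Int) (i : Nat) :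
    pvScan h n i = pvOuterLoop (h.drop i) n := by
  induction i using pvScan.induct h n with
  | case1 i hi j hj =>
    rw [pvScan]
    simp only [hi, dif_pos]
    rw [List.drop_eq_getElem_cons hi, pvOuterLoop.eq_2]
    have hrun : pvInnerRun (h[i] :: h.drop (i + 1)) h[i] 1 = j - i := by
      show pvInnerRun (h[i] :: h.drop (i + 1)) h[i] 1 = pvInnerRun h h[i] (i + 1) - i
      rw [pvInnerRun_eq, pvInnerRun_eq]
      simp only [List.drop_one, List.tail_cons]
      omega
    rw [hrun]
    split
    · rfl
    · exact absurd hj (by assumption)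
  | case2 i hi j hj ih =>
    rw [pvScan]
    simp only [hi, dif_pos]
    rw [List.drop_eq_getElem_cons hi, pvOuterLoop.eq_2]
    have hrun : pvInnerRun (h[i] :: h.drop (i + 1)) h[i] 1 = j - i := by
      show pvInnerRun (h[i] :: h.drop (i + 1)) h[i] 1 = pvInnerRun h h[i] (i + 1) - i
      rw [pvInnerRun_eq, pvInnerRun_eq]
      simp only [List.drop_one, List.tail_cons]
      omega
    rw [hrun, if_neg (by exact hj), ih, ← List.drop_eq_getElem_cons hi, List.drop_drop]
    have hge : i + 1 <= j := pvInnerRun_ge h h[i] (i + 1)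
    clear_value j
    rw [if_neg hj]
    have he : i + (j - i) = j := by omega
    rw [he]
  | case3 i hi =>
    rw [pvScan, List.drop_eq_nil_of_le (by omega)]
    simp [hi, pvOuterLoop]

theorem b_iff (hand : List String) (n : Int) :
    is_n_of_a_kind_alt hand n = true ↔ ∃ c ∈ hand, (hand.count c : Int) = n := by
  unfold is_n_of_a_kind_alt
  rw [pvScan_eq_outer, List.drop_zero]
  rw [outer_iff _ _ (by simpa using PySem.List.sorted_pairwise hand (fun x => x))]
  have hperm := PySem.List.sorted_perm hand (fun x => x) false
  constructor
  · rintro ⟨x, hxm, hxc⟩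
    exact ⟨x, hperm.mem_iff.1 hxm, by rw [← hperm.count_eq]; exact hxc⟩
  · rintro ⟨x, hxm, hxc⟩
    exact ⟨x, hperm.mem_iff.2 hxm, by rw [hperm.count_eq]; exact hxc⟩

-- ===== VERDICT =====
theorem is_n_of_a_kind_spec : Claim_equal_is_n_of_a_kind := by
  intro hand n _
  unfold Spec_is_n_of_a_kind
  exact Bool.eq_iff_iff.mpr ((a_iff hand n).trans (b_iff hand n).symm)
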